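-- pv_equiv track=rewrite | github.com/AH-Developer-AI/ahvoicegenai | app.py | normalize_voice
-- ===== SOURCE A (Python) =====
-- def normalize_voice(v):
--     """Normalize possibly different API field names from AirVoz."""
--     def pick(*keys, default=None):
--         for k in keys:
--             if isinstance(v, dict) and k in v and v[k] not in (None, ""):
--                 return v[k]
--         return default
--
--     return {
--         "name":       pick("name", "VoiceName", "voice_name", default="Unknown"),
--         "gender":     pick("gender", "Gender", default="N/A"),
--         "voice_id":   pick("voice_id", "id", "VoiceId", "voiceID", default=""),
--         "style":      pick("style", "Style", default=""),
--         "avatar_url": pick("avatar_url", "AvatarUrl", "avatarURL", "image_url", default=""),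
--         "sample_url": pick("sample_url", "SampleUrl", "audio_sample_url", "preview_url", default=""),
--         "locale":     pick("locale", "Locale", default=None),
--     }
-- ===== SOURCE B (Python) =====
-- # Inverted index: alias key -> (canonical field, priority = its rank in A's candidate list).
-- _ALIAS = {
--     "name": ("name", 0), "VoiceName": ("name", 1), "voice_name": ("name", 2),
--     "gender": ("gender", 0), "Gender": ("gender", 1),
--     "voice_id": ("voice_id", 0), "id": ("voice_id", 1), "VoiceId": ("voice_id", 2),
--     "voiceID": ("voice_id", 3),
--     "style": ("style", 0), "Style": ("style", 1),
--     "avatar_url": ("avatar_url", 0), "AvatarUrl": ("avatar_url", 1),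
--     "avatarURL": ("avatar_url", 2), "image_url": ("avatar_url", 3),
--     "sample_url": ("sample_url", 0), "SampleUrl": ("sample_url", 1),
--     "audio_sample_url": ("sample_url", 2), "preview_url": ("sample_url", 3),
--     "locale": ("locale", 0), "Locale": ("locale", 1),
-- }
--
-- _DEFAULTS = [
--     ("name", "Unknown"), ("gender", "N/A"), ("voice_id", ""), ("style", ""),
--     ("avatar_url", ""), ("sample_url", ""), ("locale", None),
-- ]
--
--
-- def normalize_voice(v):
--     """Normalize possibly different API field names from AirVoz."""
--     best = {}  # field -> (priority, value): best candidate seen so far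
--     if isinstance(v, dict):
--         for k, x in v.items():
--             slot = _ALIAS.get(k)
--             if slot is not None and x not in (None, ""):
--                 f, p = slot
--                 if f not in best or p < best[f][0]:
--                     best[f] = (p, x)
--     return {f: (best[f][1] if f in best else d) for f, d in _DEFAULTS}
-- ===== Notes on version B (the rewrite author's own statement) =====
-- stated objective: alternative
-- what changed: Inverts the traversal: instead of A's seven pick() calls each scanning a candidate-key list against the dict, B makes one pass over v.items() through an inverted alias->(field,priority) index, keeping the minimum-priority non-empty candidate per field, then emits the seven fields with defaults.
import Mathlib
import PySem

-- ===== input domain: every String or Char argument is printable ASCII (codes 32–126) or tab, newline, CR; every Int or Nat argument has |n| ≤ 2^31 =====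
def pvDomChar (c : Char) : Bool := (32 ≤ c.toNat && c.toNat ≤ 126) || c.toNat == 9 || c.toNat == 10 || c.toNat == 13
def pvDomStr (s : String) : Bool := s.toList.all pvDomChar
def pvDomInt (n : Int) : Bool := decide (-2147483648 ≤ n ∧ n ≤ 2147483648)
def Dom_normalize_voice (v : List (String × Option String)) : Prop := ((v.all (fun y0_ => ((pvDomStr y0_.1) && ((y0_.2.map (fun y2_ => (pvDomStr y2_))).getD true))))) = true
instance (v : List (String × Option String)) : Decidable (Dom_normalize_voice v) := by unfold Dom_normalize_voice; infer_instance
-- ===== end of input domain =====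

-- B inverts the traversal: one pass over v's items through an alias->(field,priority) index,
-- keeping the minimum-priority non-empty candidate per field (objective: alternative).
-- Neither side mutates v; the equivalence is about the return value.

-- ===== PORT A =====
-- A's inner helper pick(*keys, default): scan keys, return v[k] for the first k present
-- with a value not in (None, ""), else the default.  (v is a dict here, so the
-- isinstance(v, dict) test is True.)
def pvPickA (v : List (String × Option String)) (keys : List String) (dflt : Option String) : Option String :=
  match keys with
  | [] => dflt
  | k :: ks =>
      match (PySem.Dict.mk v).get? k with
      | some x => if x ≠ none ∧ x ≠ some "" then x else pvPickA v ks dflt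
      | none => pvPickA v ks dflt

def normalize_voice (v : List (String × Option String)) : List (String × Option String) :=
  [("name",       pvPickA v ["name", "VoiceName", "voice_name"] (some "Unknown")),
   ("gender",     pvPickA v ["gender", "Gender"] (some "N/A")),
   ("voice_id",   pvPickA v ["voice_id", "id", "VoiceId", "voiceID"] (some "")),
   ("style",      pvPickA v ["style", "Style"] (some "")),
   ("avatar_url", pvPickA v ["avatar_url", "AvatarUrl", "avatarURL", "image_url"] (some "")),
   ("sample_url", pvPickA v ["sample_url", "SampleUrl", "audio_sample_url", "preview_url"] (some "")),
   ("locale",     pvPickA v ["locale", "Locale"] none)]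

-- ===== PORT B =====
-- Source B's module-level inverted index _ALIAS: alias key -> (canonical field, priority)
def pvAlias : PySem.Dict String (String × Nat) := PySem.Dict.mk
  [("name", ("name", 0)), ("VoiceName", ("name", 1)), ("voice_name", ("name", 2)),
   ("gender", ("gender", 0)), ("Gender", ("gender", 1)),
   ("voice_id", ("voice_id", 0)), ("id", ("voice_id", 1)), ("VoiceId", ("voice_id", 2)),
   ("voiceID", ("voice_id", 3)),
   ("style", ("style", 0)), ("Style", ("style", 1)),
   ("avatar_url", ("avatar_url", 0)), ("AvatarUrl", ("avatar_url", 1)),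
   ("avatarURL", ("avatar_url", 2)), ("image_url", ("avatar_url", 3)),
   ("sample_url", ("sample_url", 0)), ("SampleUrl", ("sample_url", 1)),
   ("audio_sample_url", ("sample_url", 2)), ("preview_url", ("sample_url", 3)),
   ("locale", ("locale", 0)), ("Locale", ("locale", 1))]

-- Source B's module-level _DEFAULTS
def pvDefaults : List (String × Option String) :=
  [("name", some "Unknown"), ("gender", some "N/A"), ("voice_id", some ""), ("style", some ""),
   ("avatar_url", some ""), ("sample_url", some ""), ("locale", none)]

-- the body of Source B's loop: slot = _ALIAS.get(k); if slot and x not in (None,""): keep the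
-- better-priority candidate ('f not in best or p < best[f][0]')
def pvStepB (best : PySem.Dict String (Nat × Option String)) (kx : String × Option String) :
    PySem.Dict String (Nat × Option String) :=
  match pvAlias.get? kx.1 with
  | some fp =>
      if kx.2 ≠ none ∧ kx.2 ≠ some "" then
        match best.get? fp.1 with
        | none => best.insert fp.1 (fp.2, kx.2)
        | some pe => if fp.2 < pe.1 then best.insert fp.1 (fp.2, kx.2) else best
      else best
  | none => best

-- final dict comprehension over the seven distinct field names, in _DEFAULTS order
def normalize_voice_alt (v : List (String × Option String)) : List (String × Option String) :=
  let best := v.foldl pvStepB PySem.Dict.empty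
  pvDefaults.map (fun fd => (fd.1, match best.get? fd.1 with | some pe => pe.2 | none => fd.2))

-- ===== PRECONDITION & SPEC =====
-- A Python dict cannot have two equal keys, so the association-list encoding of A's input is
-- canonical only when the keys are distinct; Pre_ excludes lists with a repeated key, which
-- encode no Python dict (there the two ports' conventions for the repeated key differ).
def Pre_normalize_voice (v : List (String × Option String)) : Prop := (v.map Prod.fst).Nodup
instance (v : List (String × Option String)) : Decidable (Pre_normalize_voice v) := by unfold Pre_normalize_voice; infer_instance
def pvWitness_normalize_voice : (List (String × Option String)) := [("name", some "Alice"), ("Gender", some "F")]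

def Spec_normalize_voice (v : List (String × Option String)) (out : List (String × Option String)) : Prop := out = normalize_voice_alt v
instance (v : List (String × Option String)) (out : List (String × Option String)) : Decidable (Spec_normalize_voice v out) := by unfold Spec_normalize_voice; infer_instance

-- ===== CLAIM (what is proved, stated in full; the proofs are below) =====
def Claim_equal_normalize_voice : Prop := ∀ (v : List (String × Option String)), Dom_normalize_voice v → Pre_normalize_voice v → Spec_normalize_voice v (normalize_voice v)

-- ===== LEMMAS AND PROOFS =====

-- the contribution of one item of v to field f, and "minimum-priority, first wins" merging
def pvHit (f : String) (kx : String × Option String) : Option (Nat × Option String) :=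
  match pvAlias.get? kx.1 with
  | some fp => if fp.1 = f ∧ kx.2 ≠ none ∧ kx.2 ≠ some "" then some (fp.2, kx.2) else none
  | none => none

def pvOmin (a b : Option (Nat × Option String)) : Option (Nat × Option String) :=
  match a, b with
  | none, b => b
  | some pa, none => some pa
  | some pa, some pb => if pb.1 < pa.1 then some pb else some pa

def pvFoldF (f : String) (v : List (String × Option String)) : Option (Nat × Option String) :=
  v.foldl (fun acc kx => pvOmin acc (pvHit f kx)) none

-- A's scan, decorated with the index of the chosen key
def pvFirstIdx (v : List (String × Option String)) : List String → Option (Nat × Option String)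
  | [] => none
  | k :: ks =>
      match (PySem.Dict.mk v).get? k with
      | some x => if x ≠ none ∧ x ≠ some "" then some (0, x)
                  else (pvFirstIdx v ks).map (fun px => (px.1 + 1, px.2))
      | none => (pvFirstIdx v ks).map (fun px => (px.1 + 1, px.2))

-- "x is a usable candidate for f at priority p"
def pvHitAt (v : List (String × Option String)) (K : List String) (p : Nat) (x : Option String) : Prop :=
  ∃ k, K[p]? = some k ∧ (k, x) ∈ v ∧ x ≠ none ∧ x ≠ some ""

def pvIsMin (v : List (String × Option String)) (K : List String) :
    Option (Nat × Option String) → Prop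
  | none => ∀ p x, ¬ pvHitAt v K p x
  | some px => pvHitAt v K px.1 px.2 ∧ ∀ q x', q < px.1 → ¬ pvHitAt v K q x'

theorem pvOmin_none_right (a : Option (Nat × Option String)) : pvOmin a none = a := by
  cases a <;> rfl

theorem pvOmin_none_left (b : Option (Nat × Option String)) : pvOmin none b = b := rfl

theorem pvOmin_assoc (a b c : Option (Nat × Option String)) :
    pvOmin (pvOmin a b) c = pvOmin a (pvOmin b c) := by
  rcases a with _ | pa <;> rcases b with _ | pb <;> rcases c with _ | pc <;>
    (try simp only [pvOmin_none_left, pvOmin_none_right]) <;> try rfl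
  all_goals
    by_cases h1 : pb.1 < pa.1 <;> by_cases h2 : pc.1 < pb.1 <;> by_cases h3 : pc.1 < pa.1 <;>
      simp [pvOmin, h1, h2, h3] <;> first | rfl | omega

theorem pvStepB_get? (best : PySem.Dict String (Nat × Option String)) (kx : String × Option String)
    (f : String) : (pvStepB best kx).get? f = pvOmin (best.get? f) (pvHit f kx) := by
  cases h : pvAlias.get? kx.1 with
  | none => simp [pvStepB, pvHit, h, pvOmin_none_right]
  | some fp =>
      simp only [pvStepB, pvHit, h]
      by_cases hg : kx.2 ≠ none ∧ kx.2 ≠ some ""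
      · rw [if_pos hg]
        by_cases hf : fp.1 = f
        · rw [if_pos ⟨hf, hg⟩]
          subst hf
          cases hb : best.get? fp.1 with
          | none => simp [PySem.Dict.get?_insert_self, pvOmin]
          | some pe =>
              by_cases hlt : fp.2 < pe.1
              · simp [hlt, PySem.Dict.get?_insert_self, pvOmin]
              · simp [hlt, hb, pvOmin]
        · have hne : f ≠ fp.1 := fun h' => hf h'.symm
          rw [if_neg (fun hc => hf hc.1), pvOmin_none_right]
          cases hb : best.get? fp.1 with
          | none => simp [PySem.Dict.get?_insert_of_ne _ _ hne]
          | some pe =>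
              by_cases hlt : fp.2 < pe.1
              · simp [hlt, PySem.Dict.get?_insert_of_ne _ _ hne]
              · simp [hlt]
      · rw [if_neg hg, if_neg (fun hc => hg hc.2), pvOmin_none_right]

theorem foldl_pvStepB_get? (v : List (String × Option String))
    (best : PySem.Dict String (Nat × Option String)) (f : String) :
    (v.foldl pvStepB best).get? f =
      v.foldl (fun acc kx => pvOmin acc (pvHit f kx)) (best.get? f) := by
  induction v generalizing best with
  | nil => rfl
  | cons kx v ih => simp only [List.foldl_cons, ih, pvStepB_get?]

theorem foldl_pvOmin_merge (v : List (String × Option String)) (f : String)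
    (a : Option (Nat × Option String)) :
    v.foldl (fun acc kx => pvOmin acc (pvHit f kx)) a = pvOmin a (pvFoldF f v) := by
  induction v generalizing a with
  | nil => simp [pvFoldF, pvOmin_none_right]
  | cons kx v ih =>
      simp only [pvFoldF, List.foldl_cons]
      rw [ih, ih, ← pvOmin_assoc]
      rfl

theorem pvFoldF_cons (f : String) (kx : String × Option String) (v : List (String × Option String)) :
    pvFoldF f (kx :: v) = pvOmin (pvHit f kx) (pvFoldF f v) := by
  simp only [pvFoldF, List.foldl_cons]
  have := foldl_pvOmin_merge v f (pvOmin none (pvHit f kx))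
  simpa [pvOmin] using this

-- membership in v as lookup in the dict built from v (keys distinct)
theorem pvMemGet (v : List (String × Option String)) (hnd : (v.map Prod.fst).Nodup)
    (k : String) (x : Option String) :
    (k, x) ∈ v ↔ (PySem.Dict.mk v).get? k = some x := by
  have hk : (PySem.Dict.mk v).keys.Nodup := by simpa [PySem.Dict.keys] using hnd
  exact ((PySem.Dict.get?_eq_some_iff_mem_items (PySem.Dict.mk v) hk (k := k) (v := x))).symm

theorem pvValUniq (v : List (String × Option String)) (hnd : (v.map Prod.fst).Nodup)
    (k : String) (x y : Option String) (h1 : (k, x) ∈ v) (h2 : (k, y) ∈ v) : x = y := by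
  rw [pvMemGet v hnd] at h1 h2
  rw [h1] at h2
  exact Option.some.inj h2

theorem pvHitAt_succ (v : List (String × Option String)) (k : String) (ks : List String)
    (p : Nat) (x : Option String) : pvHitAt v (k :: ks) (p + 1) x ↔ pvHitAt v ks p x := by
  simp [pvHitAt]

theorem pvHitAt_zero (v : List (String × Option String)) (k : String) (ks : List String)
    (x : Option String) :
    pvHitAt v (k :: ks) 0 x ↔ (k, x) ∈ v ∧ x ≠ none ∧ x ≠ some "" := by
  simp [pvHitAt]

theorem pvIsMin_shift (v : List (String × Option String)) (k : String) (ks : List String)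
    (r : Option (Nat × Option String))
    (hz : ∀ x', ¬ pvHitAt v (k :: ks) 0 x') (h : pvIsMin v ks r) :
    pvIsMin v (k :: ks) (r.map (fun px => (px.1 + 1, px.2))) := by
  cases r with
  | none =>
      intro p x
      cases p with
      | zero => exact hz x
      | succ p => rw [pvHitAt_succ]; exact h p x
  | some px =>
      refine ⟨?_, ?_⟩
      · show pvHitAt v (k :: ks) (px.1 + 1) px.2
        rw [pvHitAt_succ]; exact h.1
      · intro q x' hq
        cases q with
        | zero => exact hz x'
        | succ q =>
            rw [pvHitAt_succ]
            exact h.2 q x' (by simpa using Nat.lt_of_succ_lt_succ hq)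

theorem pvFirstIdx_isMin (v : List (String × Option String)) (hnd : (v.map Prod.fst).Nodup)
    (K : List String) : pvIsMin v K (pvFirstIdx v K) := by
  induction K with
  | nil =>
      intro p x hx
      obtain ⟨k, hk, -⟩ := hx
      simp at hk
  | cons k ks ih =>
      cases hg : (PySem.Dict.mk v).get? k with
      | some x =>
          have hE : pvFirstIdx v (k :: ks) =
              if x ≠ none ∧ x ≠ some "" then some (0, x)
              else (pvFirstIdx v ks).map (fun px => (px.1 + 1, px.2)) := by
            simp only [pvFirstIdx, hg]
          rw [hE]
          by_cases hx : x ≠ none ∧ x ≠ some ""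
          · rw [if_pos hx]
            refine ⟨?_, ?_⟩
            · exact ⟨k, rfl, (pvMemGet v hnd k x).mpr hg, hx.1, hx.2⟩
            · intro q x' hq; omega
          · rw [if_neg hx]
            refine pvIsMin_shift v k ks _ ?_ ih
            intro x' hx'
            rw [pvHitAt_zero] at hx'
            obtain ⟨hmem, hgood⟩ := hx'
            rw [pvMemGet v hnd] at hmem
            rw [hg] at hmem
            exact hx (Option.some.inj hmem ▸ hgood)
      | none =>
          have hE : pvFirstIdx v (k :: ks) =
              (pvFirstIdx v ks).map (fun px => (px.1 + 1, px.2)) := by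
            simp only [pvFirstIdx, hg]
          rw [hE]
          refine pvIsMin_shift v k ks _ ?_ ih
          intro x' hx'
          rw [pvHitAt_zero] at hx'
          obtain ⟨hmem, -⟩ := hx'
          rw [pvMemGet v hnd, hg] at hmem
          simp at hmem

theorem pvIsMin_unique (v : List (String × Option String)) (hnd : (v.map Prod.fst).Nodup)
    (K : List String) (r1 r2 : Option (Nat × Option String))
    (h1 : pvIsMin v K r1) (h2 : pvIsMin v K r2) : r1 = r2 := by
  cases r1 with
  | none =>
      cases r2 with
      | none => rfl
      | some qx => exact absurd h2.1 (h1 _ _)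
  | some px =>
      cases r2 with
      | none => exact absurd h1.1 (h2 _ _)
      | some qx =>
          obtain ⟨hh1, hm1⟩ := h1
          obtain ⟨hh2, hm2⟩ := h2
          have hp : px.1 = qx.1 := by
            rcases Nat.lt_trichotomy px.1 qx.1 with h | h | h
            · exact absurd hh1 (hm2 _ _ h)
            · exact h
            · exact absurd hh2 (hm1 _ _ h)
          obtain ⟨k1, hk1, hmem1, -⟩ := hh1
          obtain ⟨k2, hk2, hmem2, -⟩ := hh2
          rw [hp, hk2] at hk1
          have hk : k2 = k1 := Option.some.inj hk1
          subst hk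
          have hv : px.2 = qx.2 := pvValUniq v hnd k2 _ _ hmem1 hmem2
          cases px; cases qx
          simp_all

-- decompose a hit of kx :: v into the head contribution and a hit of v
theorem pvHitAt_cons (kx : String × Option String) (v : List (String × Option String))
    (K : List String) (p : Nat) (x : Option String) :
    pvHitAt (kx :: v) K p x ↔
      (K[p]? = some kx.1 ∧ x = kx.2 ∧ kx.2 ≠ none ∧ kx.2 ≠ some "") ∨ pvHitAt v K p x := by
  constructor
  · rintro ⟨k, hk, hmem, hgood⟩
    rcases List.mem_cons.mp hmem with heq | hmem'
    · left
      have h1 : k = kx.1 := congrArg Prod.fst heq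
      have h2 : x = kx.2 := congrArg Prod.snd heq
      exact ⟨h1 ▸ hk, h2, h2 ▸ hgood⟩
    · right; exact ⟨k, hk, hmem', hgood⟩
  · rintro (⟨hk, hx, hgood⟩ | ⟨k, hk, hmem, hgood⟩)
    · exact ⟨kx.1, hk, by rw [hx]; exact List.mem_cons_self .., hx ▸ hgood⟩
    · exact ⟨k, hk, List.mem_cons_of_mem _ hmem, hgood⟩

theorem pvHit_eq_some (f : String) (kx : String × Option String) (p0 : Nat) (x0 : Option String)
    (h : pvHit f kx = some (p0, x0)) :
    pvAlias.get? kx.1 = some (f, p0) ∧ x0 = kx.2 ∧ kx.2 ≠ none ∧ kx.2 ≠ some "" := by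
  unfold pvHit at h
  split at h
  case h_1 fp heq =>
    split_ifs at h with hc
    injection h with h'
    have h1 : fp.2 = p0 := congrArg Prod.fst h'
    have h2 : kx.2 = x0 := congrArg Prod.snd h'
    obtain ⟨hc1, hc2⟩ := hc
    refine ⟨?_, h2.symm, hc2⟩
    rw [heq]
    have : fp = (f, p0) := by cases fp; simp_all
    rw [this]
  case h_2 heq => simp at h

theorem pvHit_eq_none (f : String) (kx : String × Option String) (p : Nat)
    (hgood : kx.2 ≠ none ∧ kx.2 ≠ some "") (ha : pvAlias.get? kx.1 = some (f, p))
    (hh : pvHit f kx = none) : False := by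
  unfold pvHit at hh
  rw [ha] at hh
  simp [hgood.1, hgood.2] at hh

theorem pvFoldF_isMin (f : String) (K : List String)
    (hA : ∀ k p, pvAlias.get? k = some (f, p) → K[p]? = some k)
    (hB : ∀ (p : Nat) k, K[p]? = some k → pvAlias.get? k = some (f, p))
    (v : List (String × Option String)) :
    pvIsMin v K (pvFoldF f v) := by
  induction v with
  | nil =>
      intro p x hx
      obtain ⟨k, -, hmem, -⟩ := hx
      simp at hmem
  | cons kx v ih =>
      rw [pvFoldF_cons]
      cases hh : pvHit f kx with
      | none =>
          rw [pvOmin_none_left]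
          -- the head item contributes no hit
          have hhead : ∀ (p : Nat) (x : Option String), K[p]? = some kx.1 → x = kx.2 →
              kx.2 ≠ none → kx.2 ≠ some "" → False := by
            intro p x hk _ hg1 hg2
            exact pvHit_eq_none f kx p ⟨hg1, hg2⟩ (hB p kx.1 hk) hh
          cases hF : pvFoldF f v with
          | none =>
              intro p x hx
              rcases (pvHitAt_cons kx v K p x).mp hx with ⟨hk, hx2, hg1, hg2⟩ | htail
              · exact hhead p x hk hx2 hg1 hg2
              · exact (hF ▸ ih) p x htail
          | some px =>
              have ihF := hF ▸ ih
              refine ⟨?_, ?_⟩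
              · exact (pvHitAt_cons kx v K px.1 px.2).mpr (Or.inr ihF.1)
              · intro q x' hq hx'
                rcases (pvHitAt_cons kx v K q x').mp hx' with ⟨hk, hx2, hg1, hg2⟩ | htail
                · exact hhead q x' hk hx2 hg1 hg2
                · exact ihF.2 q x' hq htail
      | some px0 =>
          obtain ⟨halias, hx0, hg1, hg2⟩ := pvHit_eq_some f kx px0.1 px0.2 (by rw [hh])
          have hK0 : K[px0.1]? = some kx.1 := hA kx.1 px0.1 halias
          have hheadHit : pvHitAt (kx :: v) K px0.1 px0.2 :=
            (pvHitAt_cons kx v K px0.1 px0.2).mpr (Or.inl ⟨hK0, hx0, hg1, hg2⟩)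
          have hq0 : ∀ q : Nat, K[q]? = some kx.1 → q = px0.1 := by
            intro q hk
            have := hB q kx.1 hk
            rw [halias] at this
            exact (congrArg Prod.snd (Option.some.inj this)).symm
          cases hF : pvFoldF f v with
          | none =>
              rw [pvOmin_none_right]
              refine ⟨hheadHit, ?_⟩
              intro q x' hq hx'
              rcases (pvHitAt_cons kx v K q x').mp hx' with ⟨hk, -, -⟩ | htail
              · exact absurd (hq0 q hk) (by omega)
              · exact (hF ▸ ih) q x' htail
          | some px =>
              have ihF := hF ▸ ih
              by_cases hlt : px.1 < px0.1
              · have : pvOmin (some px0) (some px) = some px := by simp [pvOmin, hlt]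
                rw [this]
                refine ⟨(pvHitAt_cons kx v K px.1 px.2).mpr (Or.inr ihF.1), ?_⟩
                intro q x' hq hx'
                rcases (pvHitAt_cons kx v K q x').mp hx' with ⟨hk, -, -⟩ | htail
                · exact absurd (hq0 q hk) (by omega)
                · exact ihF.2 q x' hq htail
              · have : pvOmin (some px0) (some px) = some px0 := by simp [pvOmin, hlt]
                rw [this]
                refine ⟨hheadHit, ?_⟩
                intro q x' hq hx'
                rcases (pvHitAt_cons kx v K q x').mp hx' with ⟨hk, -, -⟩ | htail
                · exact absurd (hq0 q hk) (by omega)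
                · exact ihF.2 q x' (by omega) htail

theorem pvPickA_eq_firstIdx (v : List (String × Option String)) (K : List String)
    (d : Option String) :
    pvPickA v K d = (match pvFirstIdx v K with | some px => px.2 | none => d) := by
  induction K with
  | nil => rfl
  | cons k ks ih =>
      simp only [pvPickA, pvFirstIdx]
      cases h : (PySem.Dict.mk v).get? k with
      | none => rw [ih]; cases pvFirstIdx v ks <;> rfl
      | some x =>
          by_cases hg : x ≠ none ∧ x ≠ some ""
          · simp [hg]
          · simp only [hg, if_false, ih]
            cases pvFirstIdx v ks <;> rfl

theorem pvField_eq (v : List (String × Option String)) (hnd : (v.map Prod.fst).Nodup)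
    (f : String) (K : List String) (d : Option String)
    (hA : ∀ k p, pvAlias.get? k = some (f, p) → K[p]? = some k)
    (hB : ∀ (p : Nat) k, K[p]? = some k → pvAlias.get? k = some (f, p)) :
    pvPickA v K d =
      (match (v.foldl pvStepB PySem.Dict.empty).get? f with | some pe => pe.2 | none => d) := by
  have h1 : (v.foldl pvStepB PySem.Dict.empty).get? f = pvFoldF f v := by
    rw [foldl_pvStepB_get?, PySem.Dict.get?_empty]; rfl
  have h2 : pvFoldF f v = pvFirstIdx v K :=
    pvIsMin_unique v hnd K _ _ (pvFoldF_isMin f K hA hB v) (pvFirstIdx_isMin v hnd K)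
  rw [h1, h2, pvPickA_eq_firstIdx]

theorem pvA_name : ∀ (k : String) (p : Nat), pvAlias.get? k = some ("name", p) →
    (["name", "VoiceName", "voice_name"] : List String)[p]? = some k := by
  intro k p h
  have hm : (k, (("name" : String), p)) ∈ pvAlias.items :=
    PySem.Dict.mem_items_of_get?_eq_some pvAlias h
  simp [pvAlias] at hm
  rcases hm with ⟨rfl, rfl⟩ | ⟨rfl, rfl⟩ | ⟨rfl, rfl⟩ <;> rfl

theorem pvB_name : ∀ (p : Nat) (k : String),
    (["name", "VoiceName", "voice_name"] : List String)[p]? = some k →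
    pvAlias.get? k = some ("name", p) := by
  intro p k h
  rcases p with _ | _ | _ | _ | p <;>
    simp only [List.getElem?_cons_zero, List.getElem?_cons_succ, List.getElem?_nil] at h <;>
    (try cases h) <;> rfl

theorem pvA_gender : ∀ (k : String) (p : Nat), pvAlias.get? k = some ("gender", p) →
    (["gender", "Gender"] : List String)[p]? = some k := by
  intro k p h
  have hm : (k, (("gender" : String), p)) ∈ pvAlias.items :=
    PySem.Dict.mem_items_of_get?_eq_some pvAlias h
  simp [pvAlias] at hm
  rcases hm with ⟨rfl, rfl⟩ | ⟨rfl, rfl⟩ <;> rfl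

theorem pvB_gender : ∀ (p : Nat) (k : String),
    (["gender", "Gender"] : List String)[p]? = some k →
    pvAlias.get? k = some ("gender", p) := by
  intro p k h
  rcases p with _ | _ | _ | _ | p <;>
    simp only [List.getElem?_cons_zero, List.getElem?_cons_succ, List.getElem?_nil] at h <;>
    (try cases h) <;> rfl

theorem pvA_voice_id : ∀ (k : String) (p : Nat), pvAlias.get? k = some ("voice_id", p) →
    (["voice_id", "id", "VoiceId", "voiceID"] : List String)[p]? = some k := by
  intro k p h
  have hm : (k, (("voice_id" : String), p)) ∈ pvAlias.items :=
    PySem.Dict.mem_items_of_get?_eq_some pvAlias h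
  simp [pvAlias] at hm
  rcases hm with ⟨rfl, rfl⟩ | ⟨rfl, rfl⟩ | ⟨rfl, rfl⟩ | ⟨rfl, rfl⟩ <;> rfl

theorem pvB_voice_id : ∀ (p : Nat) (k : String),
    (["voice_id", "id", "VoiceId", "voiceID"] : List String)[p]? = some k →
    pvAlias.get? k = some ("voice_id", p) := by
  intro p k h
  rcases p with _ | _ | _ | _ | p <;>
    simp only [List.getElem?_cons_zero, List.getElem?_cons_succ, List.getElem?_nil] at h <;>
    (try cases h) <;> rfl

theorem pvA_style : ∀ (k : String) (p : Nat), pvAlias.get? k = some ("style", p) →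
    (["style", "Style"] : List String)[p]? = some k := by
  intro k p h
  have hm : (k, (("style" : String), p)) ∈ pvAlias.items :=
    PySem.Dict.mem_items_of_get?_eq_some pvAlias h
  simp [pvAlias] at hm
  rcases hm with ⟨rfl, rfl⟩ | ⟨rfl, rfl⟩ <;> rfl

theorem pvB_style : ∀ (p : Nat) (k : String),
    (["style", "Style"] : List String)[p]? = some k →
    pvAlias.get? k = some ("style", p) := by
  intro p k h
  rcases p with _ | _ | _ | _ | p <;>
    simp only [List.getElem?_cons_zero, List.getElem?_cons_succ, List.getElem?_nil] at h <;>
    (try cases h) <;> rfl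

theorem pvA_avatar_url : ∀ (k : String) (p : Nat), pvAlias.get? k = some ("avatar_url", p) →
    (["avatar_url", "AvatarUrl", "avatarURL", "image_url"] : List String)[p]? = some k := by
  intro k p h
  have hm : (k, (("avatar_url" : String), p)) ∈ pvAlias.items :=
    PySem.Dict.mem_items_of_get?_eq_some pvAlias h
  simp [pvAlias] at hm
  rcases hm with ⟨rfl, rfl⟩ | ⟨rfl, rfl⟩ | ⟨rfl, rfl⟩ | ⟨rfl, rfl⟩ <;> rfl

theorem pvB_avatar_url : ∀ (p : Nat) (k : String),
    (["avatar_url", "AvatarUrl", "avatarURL", "image_url"] : List String)[p]? = some k →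
    pvAlias.get? k = some ("avatar_url", p) := by
  intro p k h
  rcases p with _ | _ | _ | _ | p <;>
    simp only [List.getElem?_cons_zero, List.getElem?_cons_succ, List.getElem?_nil] at h <;>
    (try cases h) <;> rfl

theorem pvA_sample_url : ∀ (k : String) (p : Nat), pvAlias.get? k = some ("sample_url", p) →
    (["sample_url", "SampleUrl", "audio_sample_url", "preview_url"] : List String)[p]? = some k := by
  intro k p h
  have hm : (k, (("sample_url" : String), p)) ∈ pvAlias.items :=
    PySem.Dict.mem_items_of_get?_eq_some pvAlias h
  simp [pvAlias] at hm
  rcases hm with ⟨rfl, rfl⟩ | ⟨rfl, rfl⟩ | ⟨rfl, rfl⟩ | ⟨rfl, rfl⟩ <;> rfl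

theorem pvB_sample_url : ∀ (p : Nat) (k : String),
    (["sample_url", "SampleUrl", "audio_sample_url", "preview_url"] : List String)[p]? = some k →
    pvAlias.get? k = some ("sample_url", p) := by
  intro p k h
  rcases p with _ | _ | _ | _ | p <;>
    simp only [List.getElem?_cons_zero, List.getElem?_cons_succ, List.getElem?_nil] at h <;>
    (try cases h) <;> rfl

theorem pvA_locale : ∀ (k : String) (p : Nat), pvAlias.get? k = some ("locale", p) →
    (["locale", "Locale"] : List String)[p]? = some k := by
  intro k p h
  have hm : (k, (("locale" : String), p)) ∈ pvAlias.items :=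
    PySem.Dict.mem_items_of_get?_eq_some pvAlias h
  simp [pvAlias] at hm
  rcases hm with ⟨rfl, rfl⟩ | ⟨rfl, rfl⟩ <;> rfl

theorem pvB_locale : ∀ (p : Nat) (k : String),
    (["locale", "Locale"] : List String)[p]? = some k →
    pvAlias.get? k = some ("locale", p) := by
  intro p k h
  rcases p with _ | _ | _ | _ | p <;>
    simp only [List.getElem?_cons_zero, List.getElem?_cons_succ, List.getElem?_nil] at h <;>
    (try cases h) <;> rfl

-- ===== VERDICT (by name: the statement is the Claim_ definition above) =====
theorem normalize_voice_spec : Claim_equal_normalize_voice := by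
  intro v _ hpre
  unfold Spec_normalize_voice normalize_voice normalize_voice_alt pvDefaults
  simp only [List.map_cons, List.map_nil]
  rw [pvField_eq v hpre "name" _ _ pvA_name pvB_name,
      pvField_eq v hpre "gender" _ _ pvA_gender pvB_gender,
      pvField_eq v hpre "voice_id" _ _ pvA_voice_id pvB_voice_id,
      pvField_eq v hpre "style" _ _ pvA_style pvB_style,
      pvField_eq v hpre "avatar_url" _ _ pvA_avatar_url pvB_avatar_url,
      pvField_eq v hpre "sample_url" _ _ pvA_sample_url pvB_sample_url,
      pvField_eq v hpre "locale" _ _ pvA_locale pvB_locale]
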